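-- pv_equiv track=rewrite | github.com/harenbrs/primes | mersenne.py | fast_mod
-- ===== SOURCE A (Python) =====
-- def fast_mod(k, Mp, p):
--     if k < 0:
--         k += Mp
--
--     if k < Mp:
--         return k
--
--     if k == Mp:
--         return 0
--
--     return fast_mod((k & Mp) + (k >> p), Mp, p)
-- ===== SOURCE B (Python) =====
-- def fast_mod(k, Mp, p):
--     if k < 0:
--         k += Mp
--
--     while k > Mp:
--         k = (k & Mp) + (k >> p)
--
--     return 0 if k == Mp else k
-- ===== Notes on version B (the rewrite author's own statement) =====
-- stated objective: simpler
-- what changed: Replaces the tail recursion (which re-tests k<0 and re-dispatches on three branches at every call) with a single up-front negative fix, one while-loop over the folding step, and one final k==Mp check.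
-- outside the precondition, e.g. on fast_mod(7, 6, 3): A returns 0, B returns 0
import Mathlib
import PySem

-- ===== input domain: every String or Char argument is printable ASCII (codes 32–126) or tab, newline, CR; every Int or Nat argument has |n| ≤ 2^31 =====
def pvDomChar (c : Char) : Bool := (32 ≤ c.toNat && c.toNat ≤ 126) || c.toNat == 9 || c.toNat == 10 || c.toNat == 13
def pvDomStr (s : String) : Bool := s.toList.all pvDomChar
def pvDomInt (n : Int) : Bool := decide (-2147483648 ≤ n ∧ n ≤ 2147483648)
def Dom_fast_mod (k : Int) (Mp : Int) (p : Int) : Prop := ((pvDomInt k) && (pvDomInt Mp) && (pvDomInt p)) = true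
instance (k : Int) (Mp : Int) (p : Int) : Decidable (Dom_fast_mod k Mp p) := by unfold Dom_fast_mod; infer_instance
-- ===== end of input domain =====

-- B replaces A's tail recursion by one up-front negative fix, a while-loop on the same
-- folding step, and a single final k == Mp check (objective: simpler).


-- ===== PORT A =====
-- Python's unbounded recursion realised with a fuel counter; under Pre_ the fuel
-- k.toNat + 1 always suffices (each recursive call strictly decreases a nonnegative k).
-- 'k >> p' is ported as 'k >>> p.toNat': exact since Pre_ gives 1 ≤ p.
def fastModGo : Nat → Int → Int → Int → Int
  | 0, k, _, _ => k
  | f+1, k, Mp, p =>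
    let k1 := if k < 0 then k + Mp else k
    if k1 < Mp then k1
    else if k1 = Mp then 0
    else fastModGo f ((PySem.Int.band k1 Mp) + (k1 >>> p.toNat)) Mp p

def fast_mod (k : Int) (Mp : Int) (p : Int) : Int := fastModGo (k.toNat + 1) k Mp p

-- ===== PORT B =====
-- the while-loop of Source B, again with sufficient fuel; then the final k == Mp check.
def fastAltLoop : Nat → Int → Int → Int → Int
  | 0, k, _, _ => k
  | f+1, k, Mp, p =>
    if Mp < k then fastAltLoop f ((PySem.Int.band k Mp) + (k >>> p.toNat)) Mp p else k

def fast_mod_alt (k : Int) (Mp : Int) (p : Int) : Int :=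
  let k1 := if k < 0 then k + Mp else k
  let r := fastAltLoop (k1.toNat + 1) k1 Mp p
  if r = Mp then 0 else r

-- ===== PRECONDITION & SPEC =====
-- Pre_ admits the natural domain (Mersenne moduli Mp = 2^p - 1, p ≥ 1, any k) and,
-- for arbitrary Mp/p, every input that never reaches the folding step (adjusted k ≤ Mp).
-- It excludes non-Mersenne arguments that do reach the step, where A raises
-- (k >> p, p < 0: ValueError), usually diverges (e.g. p = 0), and only
-- accidentally terminates; B happens to agree on those accidental terminations.
def Pre_fast_mod (k : Int) (Mp : Int) (p : Int) : Prop :=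
  (1 ≤ p ∧ Mp = 2 ^ p.toNat - 1) ∨ (if k < 0 then k + Mp else k) ≤ Mp
instance (k : Int) (Mp : Int) (p : Int) : Decidable (Pre_fast_mod k Mp p) := by unfold Pre_fast_mod; infer_instance
def pvWitness_fast_mod : Int × Int × Int := (100, 7, 3)

def Spec_fast_mod (k : Int) (Mp : Int) (p : Int) (out : Int) : Prop := out = fast_mod_alt k Mp p
instance (k : Int) (Mp : Int) (p : Int) (out : Int) : Decidable (Spec_fast_mod k Mp p out) := by unfold Spec_fast_mod; infer_instance

-- ===== CLAIM (what is proved, stated in full; the proofs are below) =====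
def Claim_equal_fast_mod : Prop := ∀ (k : Int) (Mp : Int) (p : Int), Dom_fast_mod k Mp p → Pre_fast_mod k Mp p → Spec_fast_mod k Mp p (fast_mod k Mp p)

-- ===== LEMMAS AND PROOFS =====

-- the folding step on a nonnegative k is mod-plus-quotient by 2^n
lemma step_eq (n : Nat) (m : Nat) :
    PySem.Int.band (m : Int) ((2:Int) ^ n - 1) + ((m : Int) >>> n)
      = ((m % 2 ^ n + m / 2 ^ n : Nat) : Int) := by
  have h0 : (1:Nat) ≤ 2 ^ n := Nat.one_le_two_pow
  have h1 : ((2:Int) ^ n - 1) = ((2 ^ n - 1 : Nat) : Int) := by push_cast [h0]; ring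
  have h2 : ((m : Int) >>> n) = ((m >>> n : Nat) : Int) := rfl
  rw [h1, h2, PySem.Int.band_natCast]
  have h3 : m &&& (2 ^ n - 1) = m % 2 ^ n := Nat.and_two_pow_sub_one_eq_mod m n
  push_cast [h3, Nat.shiftRight_eq_div_pow]
  ring

-- under Pre_, a step from k > Mp lands strictly below k and stays ≥ 1
lemma step_bounds (n : Nat) (hn : 1 ≤ n) (m : Nat) (hm : 2 ^ n ≤ m) :
    1 ≤ m % 2 ^ n + m / 2 ^ n ∧ m % 2 ^ n + m / 2 ^ n < m := by
  have h2 : 2 ≤ 2 ^ n := by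
    calc 2 = 2 ^ 1 := rfl
    _ ≤ 2 ^ n := Nat.pow_le_pow_right (by norm_num) hn
  have hd : 1 ≤ m / 2 ^ n := Nat.one_le_div_iff (by omega) |>.mpr hm
  have heq : 2 ^ n * (m / 2 ^ n) + m % 2 ^ n = m := Nat.div_add_mod m (2 ^ n)
  have hmul : 2 * (m / 2 ^ n) ≤ 2 ^ n * (m / 2 ^ n) := Nat.mul_le_mul_right _ h2
  omega

-- main invariant: with sufficient fuel on both sides, A's recursion equals B's loop
-- followed by the final Mp-check, for every nonnegative k.
lemma main_inv (p : Int) (hp : 1 ≤ p) :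
    ∀ (m f g : Nat), m < f → m < g →
      fastModGo f (m : Int) ((2:Int) ^ p.toNat - 1) p
        = (if fastAltLoop g (m : Int) ((2:Int) ^ p.toNat - 1) p = (2:Int) ^ p.toNat - 1
           then 0 else fastAltLoop g (m : Int) ((2:Int) ^ p.toNat - 1) p) := by
  intro m
  induction m using Nat.strong_induction_on with
  | _ m ih =>
    intro f g hf hg
    obtain ⟨f, rfl⟩ : ∃ f', f = f' + 1 := ⟨f - 1, by omega⟩
    obtain ⟨g, rfl⟩ : ∃ g', g = g' + 1 := ⟨g - 1, by omega⟩
    have hn1 : 1 ≤ p.toNat := by omega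
    set q : Nat := 2 ^ p.toNat with hq
    have hq2 : 2 ≤ q := by
      calc 2 = 2 ^ 1 := rfl
      _ ≤ 2 ^ p.toNat := Nat.pow_le_pow_right (by norm_num) hn1
    have hqI : (2:Int) ^ p.toNat = ((q : Nat) : Int) := by push_cast [hq]; ring
    set Mp : Int := (2:Int) ^ p.toNat - 1 with hMpdef
    have hfix : ¬ ((m : Int) < 0) := not_lt.mpr (Int.natCast_nonneg m)
    simp only [fastModGo, fastAltLoop, if_neg hfix]
    by_cases hlt : (m : Int) < Mp
    · -- below Mp: A returns m, B's loop stops at once with m ≠ Mp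
      have hne : (m : Int) ≠ Mp := ne_of_lt hlt
      have hngt : ¬ (Mp < (m : Int)) := by omega
      rw [if_pos hlt, if_neg hngt, if_neg hne]
    · by_cases heq : (m : Int) = Mp
      · -- equal: A returns 0, B's loop stops and the final check fires
        have hngt : ¬ (Mp < (m : Int)) := by omega
        rw [if_neg hlt, if_pos heq, if_neg hngt, if_pos heq]
      · -- above Mp: both take one folding step; recurse at the smaller value
        have hgt : Mp < (m : Int) := by omega
        have hmge : q ≤ m := by rw [hMpdef, hqI] at hgt; omega
        have hb := step_bounds p.toNat hn1 m (hq ▸ hmge)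
        rw [← hq] at hb
        have hstep := step_eq p.toNat m
        rw [← hMpdef, ← hq] at hstep
        rw [if_neg hlt, if_neg heq, if_pos hgt, hstep]
        exact ih (m % q + m / q) (by omega) f g (by omega) (by omega)

-- ===== VERDICT (by name: the statement is the Claim_ definition above) =====
theorem fast_mod_spec : Claim_equal_fast_mod := by
  intro k Mp p _ hpre
  unfold Spec_fast_mod fast_mod fast_mod_alt
  rcases hpre with ⟨hp, hMp⟩ | hstepfree
  case inr =>
    -- the folding step is never reached: both return the adjusted k (or 0 at Mp)
    set k1 := if k < 0 then k + Mp else k with hk1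
    simp only [fastModGo, fastAltLoop]
    rw [← hk1, if_neg (show ¬ Mp < k1 by omega)]
    by_cases hlt : k1 < Mp
    · rw [if_pos hlt, if_neg (ne_of_lt hlt)]
    · have hEq : k1 = Mp := by omega
      rw [if_neg hlt, if_pos hEq, if_pos hEq]
  subst hMp
  set Mp : Int := (2:Int) ^ p.toNat - 1 with hMpdef
  have hMp1 : (1:Int) ≤ Mp := by
    have : (2:Int) ≤ 2 ^ p.toNat := by
      calc (2:Int) = 2 ^ 1 := rfl
      _ ≤ 2 ^ p.toNat := pow_le_pow_right₀ (by norm_num) (by omega)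
    omega
  by_cases hneg : k < 0
  · -- negative k: both apply the fix once; the fixed value lies below Mp and is returned
    have hkt : k.toNat = 0 := by omega
    simp only [hkt, fastModGo, fastAltLoop, if_pos hneg]
    rw [if_pos (show k + Mp < Mp by omega), if_neg (show ¬ (Mp < k + Mp) by omega),
      if_neg (show k + Mp ≠ Mp by omega)]
  · -- nonnegative k: the invariant with fuel k + 1 on both sides
    rw [not_lt] at hneg
    obtain ⟨m, rfl⟩ : ∃ m : Nat, k = (m : Int) := ⟨k.toNat, (Int.toNat_of_nonneg hneg).symm⟩
    have hfix : ¬ ((m : Int) < 0) := not_lt.mpr (Int.natCast_nonneg m)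
    simp only [if_neg hfix, Int.toNat_natCast]
    exact main_inv p hp m (m + 1) (m + 1) (by omega) (by omega)
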